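-- pv_equiv track=rewrite | github.com/lisasth/Master_Thesis | wise-ft-clip/utils/data_process/generate_sample_file_for_dataset.py | get_pack_type_to_dataset_name_to_num_files
-- ===== SOURCE A (Python) =====
-- def get_pack_type_to_dataset_name_to_num_files(dataset_name_to_num_files):
--     pack_type_to_dataset_name_to_num_files = {}
--     for dataset_name in dataset_name_to_num_files.keys():
--         no_pack_type = True
--         for pack_type in ["loose", "bag", "net"]:
--             if pack_type in dataset_name:
--                 no_pack_type = False
--                 if pack_type not in pack_type_to_dataset_name_to_num_files.keys():
--                     pack_type_to_dataset_name_to_num_files[pack_type] = {}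
--                 pack_type_to_dataset_name_to_num_files[pack_type][dataset_name] = dataset_name_to_num_files[dataset_name]
--
--         if no_pack_type:
--             if "no_pack_type" not in pack_type_to_dataset_name_to_num_files.keys():
--                 pack_type_to_dataset_name_to_num_files["no_pack_type"] = {}
--             pack_type_to_dataset_name_to_num_files["no_pack_type"][dataset_name] = dataset_name_to_num_files[dataset_name]
--     return pack_type_to_dataset_name_to_num_files
-- ===== SOURCE B (Python) =====
-- PACK_TYPES = ["loose", "bag", "net"]
--
--
-- def _buckets(dataset_name):
--     matched = [p for p in PACK_TYPES if p in dataset_name]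
--     return matched if matched else ["no_pack_type"]
--
--
-- def get_pack_type_to_dataset_name_to_num_files(dataset_name_to_num_files):
--     # Phase 1: determine bucket keys in order of first appearance.
--     order = []
--     for dataset_name in dataset_name_to_num_files:
--         for bucket in _buckets(dataset_name):
--             if bucket not in order:
--                 order.append(bucket)
--     # Phase 2: one filtering comprehension per bucket.
--     return {
--         bucket: {
--             name: num
--             for name, num in dataset_name_to_num_files.items()
--             if bucket in _buckets(name)
--         }
--         for bucket in order
--     }
-- ===== Notes on version B (the rewrite author's own statement) =====
-- stated objective: alternative
-- what changed: A routes each dataset one by one into a mutated dict-of-dicts with membership checks and in-place inner-dict updates; B first collects the bucket keys in order of first appearance and then builds each bucket with one filtering dict comprehension over the items.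
import Mathlib
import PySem

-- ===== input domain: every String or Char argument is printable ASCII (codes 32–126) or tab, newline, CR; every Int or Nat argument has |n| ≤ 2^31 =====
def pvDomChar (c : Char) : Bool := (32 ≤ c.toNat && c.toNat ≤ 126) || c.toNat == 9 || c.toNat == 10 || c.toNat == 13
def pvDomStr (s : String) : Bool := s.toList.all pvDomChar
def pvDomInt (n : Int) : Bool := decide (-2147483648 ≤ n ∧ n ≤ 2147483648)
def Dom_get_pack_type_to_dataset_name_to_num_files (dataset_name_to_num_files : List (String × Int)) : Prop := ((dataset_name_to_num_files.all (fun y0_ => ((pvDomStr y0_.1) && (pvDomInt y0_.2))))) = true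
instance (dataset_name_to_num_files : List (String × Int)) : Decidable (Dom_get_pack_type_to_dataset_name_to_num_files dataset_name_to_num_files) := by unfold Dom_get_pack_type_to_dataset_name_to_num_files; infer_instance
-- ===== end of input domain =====

-- B replaces A's per-dataset routing into an accumulated dict-of-dicts by a two-phase scheme
-- (collect bucket keys in first-appearance order, then one filtering comprehension per bucket);
-- objective: alternative decomposition, same asymptotic cost.

-- ===== PORT A =====
-- The input is a Python dict, ported as an association list; 'dataset_name_to_num_files[dataset_name]'
-- inside the loop over its keys is ported as the pair's own value p.2 — exact because a Python dict has
-- pairwise-distinct keys (stated in Pre_).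
def get_pack_type_to_dataset_name_to_num_files (dataset_name_to_num_files : List (String × Int)) : List (String × List (String × Int)) :=
  let final := dataset_name_to_num_files.foldl
    (fun (acc : PySem.Dict String (PySem.Dict String Int)) (p : String × Int) =>
      let s := (["loose", "bag", "net"] : List String).foldl
        (fun (s : PySem.Dict String (PySem.Dict String Int) × Bool) (pack_type : String) =>
          if PySem.Str.isIn pack_type p.1 then
            let acc1 := if s.1.contains pack_type then s.1 else s.1.insert pack_type PySem.Dict.empty
            (acc1.insert pack_type ((acc1.getD pack_type PySem.Dict.empty).insert p.1 p.2), false)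
          else s)
        (acc, true)
      if s.2 then
        let acc1 := if s.1.contains "no_pack_type" then s.1 else s.1.insert "no_pack_type" PySem.Dict.empty
        acc1.insert "no_pack_type" ((acc1.getD "no_pack_type" PySem.Dict.empty).insert p.1 p.2)
      else s.1)
    PySem.Dict.empty
  final.items.map (fun q => (q.1, q.2.items))

-- ===== PORT B =====
def PACK_TYPES : List String := ["loose", "bag", "net"]

def pvBuckets (dataset_name : String) : List String :=
  let matched := PACK_TYPES.filter (fun p => PySem.Str.isIn p dataset_name)
  if matched.isEmpty then ["no_pack_type"] else matched

-- The inner dict comprehension over the items is ported as a filter — exact because the keys of the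
-- input dict are pairwise distinct (stated in Pre_).
def get_pack_type_to_dataset_name_to_num_files_alt (dataset_name_to_num_files : List (String × Int)) : List (String × List (String × Int)) :=
  let order := dataset_name_to_num_files.foldl
    (fun (ord : List String) (p : String × Int) =>
      (pvBuckets p.1).foldl (fun ord b => if ord.contains b then ord else ord ++ [b]) ord)
    []
  order.map (fun b => (b, dataset_name_to_num_files.filter (fun q => (pvBuckets q.1).contains b)))

-- ===== PRECONDITION & SPEC =====
-- Pre_ states only that the association list is a well-formed Python dict (pairwise-distinct keys),
-- which every input the Python function can receive satisfies; it excludes no input A returns on.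
def Pre_get_pack_type_to_dataset_name_to_num_files (dataset_name_to_num_files : List (String × Int)) : Prop :=
  (dataset_name_to_num_files.map Prod.fst).Nodup
instance (dataset_name_to_num_files : List (String × Int)) : Decidable (Pre_get_pack_type_to_dataset_name_to_num_files dataset_name_to_num_files) := by unfold Pre_get_pack_type_to_dataset_name_to_num_files; infer_instance

def pvWitness_get_pack_type_to_dataset_name_to_num_files : (List (String × Int)) :=
  [("apple_bag", 3), ("banana_loose", 2), ("cucumber", 7), ("onions_net_red", 1)]

def Spec_get_pack_type_to_dataset_name_to_num_files (dataset_name_to_num_files : List (String × Int)) (out : List (String × List (String × Int))) : Prop := out = get_pack_type_to_dataset_name_to_num_files_alt dataset_name_to_num_files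
instance (dataset_name_to_num_files : List (String × Int)) (out : List (String × List (String × Int))) : Decidable (Spec_get_pack_type_to_dataset_name_to_num_files dataset_name_to_num_files out) := by unfold Spec_get_pack_type_to_dataset_name_to_num_files; infer_instance

-- ===== CLAIM (what is proved, stated in full; the proofs are below) =====
def Claim_equal_get_pack_type_to_dataset_name_to_num_files : Prop := ∀ (dataset_name_to_num_files : List (String × Int)), Dom_get_pack_type_to_dataset_name_to_num_files dataset_name_to_num_files → Pre_get_pack_type_to_dataset_name_to_num_files dataset_name_to_num_files → Spec_get_pack_type_to_dataset_name_to_num_files dataset_name_to_num_files (get_pack_type_to_dataset_name_to_num_files dataset_name_to_num_files)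

-- ===== LEMMAS AND PROOFS =====

-- A's per-item step, named for the proofs (definitionally the body of A's fold).
def pvAStep (acc : PySem.Dict String (PySem.Dict String Int)) (p : String × Int) : PySem.Dict String (PySem.Dict String Int) :=
  let s := (["loose", "bag", "net"] : List String).foldl
    (fun (s : PySem.Dict String (PySem.Dict String Int) × Bool) (pack_type : String) =>
      if PySem.Str.isIn pack_type p.1 then
        let acc1 := if s.1.contains pack_type then s.1 else s.1.insert pack_type PySem.Dict.empty
        (acc1.insert pack_type ((acc1.getD pack_type PySem.Dict.empty).insert p.1 p.2), false)
      else s)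
    (acc, true)
  if s.2 then
    let acc1 := if s.1.contains "no_pack_type" then s.1 else s.1.insert "no_pack_type" PySem.Dict.empty
    acc1.insert "no_pack_type" ((acc1.getD "no_pack_type" PySem.Dict.empty).insert p.1 p.2)
  else s.1

-- 'add one entry to bucket b' (the repeated dict-manipulation pattern of A).
def pvAddE (acc : PySem.Dict String (PySem.Dict String Int)) (b name : String) (v : Int) : PySem.Dict String (PySem.Dict String Int) :=
  let acc1 := if acc.contains b then acc else acc.insert b PySem.Dict.empty
  acc1.insert b ((acc1.getD b PySem.Dict.empty).insert name v)

def pvInsB (ord : List String) (b : String) : List String :=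
  if ord.contains b then ord else ord ++ [b]

def pvOrdStep (ord : List String) (p : String × Int) : List String :=
  (pvBuckets p.1).foldl pvInsB ord

def pvOrderOf (xs : List (String × Int)) : List String := xs.foldl pvOrdStep []

def pvShape (xs : List (String × Int)) : PySem.Dict String (PySem.Dict String Int) :=
  ⟨(pvOrderOf xs).map (fun b => (b, ⟨xs.filter (fun q => (pvBuckets q.1).contains b)⟩))⟩

theorem pvAStep_eq_addFold (acc : PySem.Dict String (PySem.Dict String Int)) (p : String × Int) :
    pvAStep acc p = (pvBuckets p.1).foldl (fun a b => pvAddE a b p.1 p.2) acc := by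
  cases h1 : PySem.Str.isIn "loose" p.1 <;> cases h2 : PySem.Str.isIn "bag" p.1 <;>
    cases h3 : PySem.Str.isIn "net" p.1 <;>
    simp only [pvAStep, pvAddE, pvBuckets, PACK_TYPES, List.foldl, List.filter, h1, h2, h3,
      if_true, if_false, Bool.false_eq_true, ite_true, ite_false,
      List.isEmpty_nil, List.isEmpty_cons, decide_true, decide_false]

theorem pvInsB_nodup {ord : List String} (b : String) (h : ord.Nodup) : (pvInsB ord b).Nodup := by
  unfold pvInsB
  split
  · exact h
  · rename_i hc
    have hb : b ∉ ord := fun hm => hc (List.contains_iff_mem.mpr hm)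
    simp [List.nodup_append, h, hb]
    exact fun a ha hab => hb (hab ▸ ha)

theorem pvFoldl_insB_nodup (bs : List String) : ∀ ord : List String, ord.Nodup → (bs.foldl pvInsB ord).Nodup := by
  induction bs with
  | nil => intro ord h; exact h
  | cons b rest ih => intro ord h; exact ih _ (pvInsB_nodup b h)

theorem pvMem_insB {ord : List String} {c : String} (b : String) (h : c ∈ ord) : c ∈ pvInsB ord b := by
  unfold pvInsB; split <;> simp [h]

theorem pvSelf_mem_insB (ord : List String) (b : String) : b ∈ pvInsB ord b := by
  unfold pvInsB; split
  · rename_i hc; exact List.contains_iff_mem.mp hc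
  · simp

theorem pvMem_foldl_insB (bs : List String) : ∀ ord : List String, ∀ c ∈ ord, c ∈ bs.foldl pvInsB ord := by
  induction bs with
  | nil => intro ord c h; exact h
  | cons b rest ih => intro ord c h; exact ih _ _ (pvMem_insB b h)

theorem pvMem_of_mem_bs (bs : List String) : ∀ ord : List String, ∀ b ∈ bs, b ∈ bs.foldl pvInsB ord := by
  induction bs with
  | nil => intro ord b h; cases h
  | cons x rest ih =>
    intro ord b h
    rcases List.mem_cons.mp h with h | h
    · subst h; exact pvMem_foldl_insB rest _ _ (pvSelf_mem_insB ord b)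
    · exact ih _ _ h

theorem pvMem_foldl_ordStep (xs : List (String × Int)) : ∀ ord : List String, ∀ c ∈ ord, c ∈ xs.foldl pvOrdStep ord := by
  induction xs with
  | nil => intro ord c h; exact h
  | cons x rest ih => intro ord c h; exact ih _ _ (pvMem_foldl_insB _ _ _ h)

theorem pvMem_orderOf_aux (xs : List (String × Int)) : ∀ ord : List String, ∀ q ∈ xs, ∀ b ∈ pvBuckets q.1,
    b ∈ xs.foldl pvOrdStep ord := by
  induction xs with
  | nil => intro ord q h; cases h
  | cons x rest ih =>
    intro ord q hq b hb
    rcases List.mem_cons.mp hq with h | h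
    · subst h
      exact pvMem_foldl_ordStep rest _ _ (pvMem_of_mem_bs _ _ _ hb)
    · exact ih _ _ h _ hb

theorem pvFoldl_ordStep_nodup (xs : List (String × Int)) : ∀ ord : List String, ord.Nodup → (xs.foldl pvOrdStep ord).Nodup := by
  induction xs with
  | nil => intro ord h; exact h
  | cons x rest ih => intro ord h; exact ih _ (pvFoldl_insB_nodup _ _ h)

theorem pvBuckets_nodup (name : String) : (pvBuckets name).Nodup := by
  unfold pvBuckets PACK_TYPES
  simp only []
  split
  · simp
  · exact List.Nodup.filter _ (by decide)

theorem pvContains_map_shape (ord : List String) (F : String → List (String × Int)) (b : String) :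
    (PySem.Dict.mk (ord.map (fun c => (c, PySem.Dict.mk (F c))))).contains b = ord.contains b := by
  simp [PySem.Dict.contains_mk, List.any_map, Function.comp_def, List.contains_eq_any_beq]
  simp [List.any_eq, beq_iff_eq]

theorem pvGetD_map_shape (ord : List String) (F : String → List (String × Int)) (b : String)
    (hnd : ord.Nodup) (hb : b ∈ ord) :
    (PySem.Dict.mk (ord.map (fun c => (c, PySem.Dict.mk (F c))))).getD b PySem.Dict.empty = PySem.Dict.mk (F b) := by
  have hmem : (b, PySem.Dict.mk (F b)) ∈ (ord.map (fun c => (c, PySem.Dict.mk (F c)))) :=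
    List.mem_map_of_mem hb
  have hkeys : (PySem.Dict.mk (ord.map (fun c => (c, PySem.Dict.mk (F c))))).keys.Nodup := by
    simpa [PySem.Dict.keys_mk, List.map_map, Function.comp_def] using hnd
  have := PySem.Dict.get?_of_mem_items (d := ⟨ord.map (fun c => (c, PySem.Dict.mk (F c)))⟩) hmem hkeys
  simp [PySem.Dict.getD_eq_get?_getD, this]

theorem pvDict_eq {κ ν : Type} (d e : PySem.Dict κ ν) (h : d.items = e.items) : d = e := by
  cases d; cases e; simpa using h

theorem pvInsert_map_shape (ord : List String) (F : String → List (String × Int)) (name : String) (v : Int) (b : String)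
    (hnd : ord.Nodup) (hb : b ∈ ord) (hfresh : name ∉ (F b).map Prod.fst) :
    (PySem.Dict.mk (ord.map (fun c => (c, PySem.Dict.mk (F c))))).insert b
        (((PySem.Dict.mk (ord.map (fun c => (c, PySem.Dict.mk (F c))))).getD b PySem.Dict.empty |>.insert name v))
      = PySem.Dict.mk (ord.map (fun c => (c, PySem.Dict.mk (if c = b then F b ++ [(name, v)] else F c)))) := by
  have hc : (PySem.Dict.mk (ord.map (fun c => (c, PySem.Dict.mk (F c))))).contains b = true := by
    rw [pvContains_map_shape]; exact List.contains_iff_mem.mpr hb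
  have hin : (PySem.Dict.mk (F b)).contains name = false := by
    rw [PySem.Dict.contains_mk, List.any_eq_false]
    intro x hx hxe
    exact hfresh (by rw [← beq_iff_eq.mp hxe]; exact List.mem_map_of_mem hx)
  have hins : (PySem.Dict.mk (F b)).insert name v = PySem.Dict.mk (F b ++ [(name, v)]) := by
    apply pvDict_eq
    rw [PySem.Dict.items_insert_of_not_contains _ _ hin]
  rw [pvGetD_map_shape _ _ _ hnd hb, hins]
  apply pvDict_eq
  rw [PySem.Dict.items_insert_of_contains _ _ hc]
  show (ord.map _).map _ = _
  rw [List.map_map]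
  apply List.map_congr_left
  intro c hcmem
  by_cases hcb : c = b
  · subst hcb; simp
  · simp [hcb]

theorem pvAddE_shape (ord : List String) (F : String → List (String × Int)) (name : String) (v : Int) (b : String)
    (hnd : ord.Nodup) (hb0 : b ∉ ord → F b = []) (hfresh : name ∉ (F b).map Prod.fst) :
    pvAddE ⟨ord.map (fun c => (c, ⟨F c⟩))⟩ b name v
      = ⟨(pvInsB ord b).map (fun c => (c, ⟨if c = b then F b ++ [(name, v)] else F c⟩))⟩ := by
  unfold pvAddE pvInsB
  by_cases hb : b ∈ ord
  · have hc : ord.contains b = true := List.contains_iff_mem.mpr hb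
    simp only [pvContains_map_shape, hc, if_true]
    exact pvInsert_map_shape ord F name v b hnd hb hfresh
  · have hc : ord.contains b = false := by
      rw [List.contains_eq_mem]; simpa using hb
    have hF : F b = [] := hb0 hb
    have hdc : (PySem.Dict.mk (ord.map (fun c => (c, PySem.Dict.mk (F c))))).contains b = false := by
      rw [pvContains_map_shape]; exact hc
    have hstep : (PySem.Dict.mk (ord.map (fun c => (c, PySem.Dict.mk (F c))))).insert b PySem.Dict.empty
        = PySem.Dict.mk ((ord ++ [b]).map (fun c => (c, PySem.Dict.mk (F c)))) := by
      apply pvDict_eq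
      rw [PySem.Dict.items_insert_of_not_contains _ _ hdc]
      simp [hF, PySem.Dict.empty]
    simp only [pvContains_map_shape, hc, Bool.false_eq_true, if_false, hstep]
    have hnd' : (ord ++ [b]).Nodup := by
      simp [List.nodup_append, hnd]
      exact fun a ha hab => hb (hab ▸ ha)
    have := pvInsert_map_shape (ord ++ [b]) F name v b hnd' (by simp) hfresh
    rw [this]

theorem pvAddFold (name : String) (v : Int) (bs : List String) (hbs : bs.Nodup) :
    ∀ (ord : List String) (F : String → List (String × Int)), ord.Nodup →
    (∀ b, b ∉ ord → F b = []) → (∀ b ∈ bs, name ∉ (F b).map Prod.fst) →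
    bs.foldl (fun a b => pvAddE a b name v) ⟨ord.map (fun c => (c, ⟨F c⟩))⟩
      = ⟨(bs.foldl pvInsB ord).map (fun c => (c, ⟨F c ++ if bs.contains c then [(name, v)] else []⟩))⟩ := by
  induction bs with
  | nil => intro ord F _ _ _; simp
  | cons b rest ih =>
    intro ord F hnd hb0 hfresh
    rcases List.nodup_cons.mp hbs with ⟨hbrest, hrestnd⟩
    simp only [List.foldl_cons]
    rw [pvAddE_shape ord F name v b hnd (fun h => hb0 b h) (hfresh b (List.mem_cons_self ..))]
    rw [ih hrestnd (pvInsB ord b) (fun c => if c = b then F b ++ [(name, v)] else F c)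
      (pvInsB_nodup b hnd)
      (by
        intro c hc
        have hcb : c ≠ b := fun h => hc (h ▸ pvSelf_mem_insB ord b)
        have hcord : c ∉ ord := fun h => hc (pvMem_insB b h)
        simp [hcb, hb0 c hcord])
      (by
        intro c hc
        have hcb : c ≠ b := fun h => hbrest (h ▸ hc)
        simp only [hcb, if_false]
        exact hfresh c (List.mem_cons_of_mem _ hc))]
    congr 1
    apply List.map_congr_left
    intro c _
    by_cases hcb : c = b
    · subst hcb
      have : c ∉ rest := hbrest
      simp [List.contains_eq_mem, this]
    · simp [hcb, List.contains_eq_mem]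

theorem pvFoldl_AStep_shape (xs : List (String × Int)) (h : (xs.map Prod.fst).Nodup) :
    xs.foldl pvAStep PySem.Dict.empty = pvShape xs := by
  induction xs using List.reverseRecOn with
  | nil => rfl
  | append_singleton ys y ih =>
    have hnd : (ys.map Prod.fst).Nodup := by
      rw [List.map_append] at h
      exact (List.nodup_append.mp h).1
    have hname : y.1 ∉ ys.map Prod.fst := by
      rw [List.map_append] at h
      have := List.nodup_append.mp h
      intro hm
      exact this.2.2 _ hm y.1 (by simp) rfl
    rw [List.foldl_append, ih hnd, List.foldl_cons, List.foldl_nil]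
    show pvAStep (pvShape ys) y = pvShape (ys ++ [y])
    rw [pvAStep_eq_addFold]
    unfold pvShape
    rw [pvAddFold y.1 y.2 (pvBuckets y.1) (pvBuckets_nodup y.1) (pvOrderOf ys)
      (fun b => ys.filter (fun q => (pvBuckets q.1).contains b))
      (pvFoldl_ordStep_nodup ys [] (by simp))
      (by
        intro b hb
        rw [List.filter_eq_nil_iff]
        intro q hq hcb
        exact hb (pvMem_orderOf_aux ys [] q hq b (List.contains_iff_mem.mp hcb)))
      (by
        intro b _ hm
        apply hname
        rcases List.mem_map.mp hm with ⟨q, hq, hq1⟩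
        exact hq1 ▸ List.mem_map_of_mem (List.mem_of_mem_filter hq))]
    have horder : pvOrderOf (ys ++ [y]) = (pvBuckets y.1).foldl pvInsB (pvOrderOf ys) := by
      unfold pvOrderOf
      rw [List.foldl_append, List.foldl_cons, List.foldl_nil]
      rfl
    rw [horder]
    congr 1
    apply List.map_congr_left
    intro c _
    rw [List.filter_append]
    by_cases hcy : c ∈ pvBuckets y.1 <;> simp [hcy, List.contains_eq_mem]

-- ===== VERDICT (by name: the statement is the Claim_ definition above) =====
theorem get_pack_type_to_dataset_name_to_num_files_spec : Claim_equal_get_pack_type_to_dataset_name_to_num_files := by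
  intro d _ hpre
  unfold Spec_get_pack_type_to_dataset_name_to_num_files
  show (d.foldl pvAStep PySem.Dict.empty).items.map (fun q => (q.1, q.2.items))
      = get_pack_type_to_dataset_name_to_num_files_alt d
  rw [pvFoldl_AStep_shape d hpre]
  show ((pvOrderOf d).map (fun b => (b, PySem.Dict.mk (d.filter (fun q => (pvBuckets q.1).contains b))))).map
      (fun q => (q.1, q.2.items)) = _
  rw [List.map_map]
  rfl
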